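-- pv_equiv track=rewrite | github.com/trungducng0410/technical-interview-practice | array/zero-matrix.py | zeroMatrixInplace
-- ===== SOURCE A (Python) =====
-- def zeroMatrixInplace(matrix):
--     m = len(matrix)
--     n = len(matrix[0])
--     for i in range(m):
--         for j in range(n):
--             if matrix[i][j] == 0:
--                 matrix[i][j] = None
--
--     for i in range(m):
--         for j in range(n):
--             if matrix[i][j] == None:
--                 for col in range(n):
--                     if matrix[i][col] != None:
--                         matrix[i][col] = 0
--
--                 for row in range(m):
--                     if matrix[row][j] != None:
--                         matrix[row][j] = 0
--
--                 matrix[i][j] = 0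
--
--     return matrix
-- ===== SOURCE B (Python) =====
-- def zeroMatrixInplace(matrix):
--     m = len(matrix)
--     n = len(matrix[0])
--     rows = set()
--     cols = set()
--     for i in range(m):
--         for j in range(n):
--             if matrix[i][j] == 0:
--                 rows.add(i)
--                 cols.add(j)
--     for i in range(m):
--         for j in range(n):
--             if i in rows or j in cols:
--                 matrix[i][j] = 0
--     return matrix
-- ===== Notes on version B (the rewrite author's own statement) =====
-- stated objective: idiomatic
-- what changed: Replaces A's None-marking pass plus per-marked-cell row and column sweeps with the canonical two-set solution: one scan records the zero rows and zero columns, one write pass zeroes flagged cells; B raises exactly where A raises (empty matrix / a row shorter than the first), so Pre_ is A's full domain.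
import Mathlib
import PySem

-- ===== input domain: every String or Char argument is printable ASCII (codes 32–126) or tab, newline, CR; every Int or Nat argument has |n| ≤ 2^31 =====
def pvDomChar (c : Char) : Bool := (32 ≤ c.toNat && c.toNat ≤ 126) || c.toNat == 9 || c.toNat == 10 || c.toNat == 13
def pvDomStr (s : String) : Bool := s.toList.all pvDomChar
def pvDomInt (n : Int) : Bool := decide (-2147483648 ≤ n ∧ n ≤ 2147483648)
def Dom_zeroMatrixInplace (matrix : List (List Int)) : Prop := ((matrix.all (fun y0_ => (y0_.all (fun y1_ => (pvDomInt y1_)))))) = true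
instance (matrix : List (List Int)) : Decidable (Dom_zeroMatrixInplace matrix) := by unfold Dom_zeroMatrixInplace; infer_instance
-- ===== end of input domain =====

-- B replaces A's None-marking plus per-marked-cell row/column sweeps by the canonical two-set
-- solution: one scan records zero rows/columns, one write pass zeroes flagged cells (objective:
-- idiomatic). Equivalence is about the RETURN value; both Pythons mutate the argument in place.

-- ===== PORT A =====
-- During phase 2 Python cells hold int-or-None, so the working state is List (List (Option Int)).
-- pvCell/pvSetCell are matrix[i][j] reads/writes; all accesses are in range under Pre_.
def pvCell (s : List (List (Option Int))) (i j : Nat) : Option Int :=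
  (s.getD i []).getD j none

def pvSetCell (s : List (List (Option Int))) (i j : Nat) (v : Option Int) :
    List (List (Option Int)) :=
  s.set i ((s.getD i []).set j v)

-- 'if matrix[i][j] == 0: matrix[i][j] = None'
def pvMark (s : List (List (Option Int))) (i j : Nat) : List (List (Option Int)) :=
  if pvCell s i j = some 0 then pvSetCell s i j none else s

-- 'for col in range(n): if matrix[i][col] != None: matrix[i][col] = 0'
def pvZeroRow (n i : Nat) (s : List (List (Option Int))) : List (List (Option Int)) :=
  (List.range n).foldl (fun s col =>
    if pvCell s i col ≠ none then pvSetCell s i col (some 0) else s) s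

-- 'for row in range(m): if matrix[row][j] != None: matrix[row][j] = 0'
def pvZeroCol (m j : Nat) (s : List (List (Option Int))) : List (List (Option Int)) :=
  (List.range m).foldl (fun s row =>
    if pvCell s row j ≠ none then pvSetCell s row j (some 0) else s) s

-- the body of A's second double loop
def pvProcess (m n : Nat) (s : List (List (Option Int))) (i j : Nat) :
    List (List (Option Int)) :=
  if pvCell s i j = none then
    pvSetCell (pvZeroCol m j (pvZeroRow n i s)) i j (some 0)
  else s

def zeroMatrixInplace (matrix : List (List Int)) : List (List Int) :=
  let m := matrix.length
  let n := matrix.headI.length   -- len(matrix[0]); Pre_ excludes the empty matrix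
  let s0 := (List.range m).foldl (fun s i =>
      (List.range n).foldl (fun s j => pvMark s i j) s)
    (matrix.map (fun r => r.map some))
  let s1 := (List.range m).foldl (fun s i =>
      (List.range n).foldl (fun s j => pvProcess m n s i j) s) s0
  -- at return every Python cell is again an int (each None is overwritten by 0 when visited),
  -- so .getD 0 is exact here
  s1.map (fun r => r.map (fun c => c.getD 0))

-- ===== PORT B =====
-- 'matrix[i][j] = 0' in B's second pass
def pvZero (s : List (List Int)) (i j : Nat) : List (List Int) :=
  s.set i ((s.getD i []).set j 0)

def zeroMatrixInplace_alt (matrix : List (List Int)) : List (List Int) :=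
  let m := matrix.length
  let n := matrix.headI.length   -- len(matrix[0]); Pre_ excludes the empty matrix
  let rc := (List.range m).foldl (fun p (i : Nat) =>
      (List.range n).foldl (fun p (j : Nat) =>
        if (matrix.getD i []).getD j 0 = 0 then
          (PySem.Set.add p.1 (i : Int), PySem.Set.add p.2 (j : Int))
        else p) p)
    ((PySem.Set.empty : PySem.Set Int), (PySem.Set.empty : PySem.Set Int))
  (List.range m).foldl (fun s (i : Nat) =>
    (List.range n).foldl (fun s (j : Nat) =>
      if PySem.Set.contains rc.1 (i : Int) || PySem.Set.contains rc.2 (j : Int) then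
        pvZero s i j
      else s) s) matrix

-- ===== PRECONDITION & SPEC =====
-- Pre_ is exactly the set of inputs on which Python A (and Python B) returns: a nonempty
-- matrix none of whose rows is shorter than the first (on the empty matrix and on a row
-- shorter than the first row, matrix[i][j] raises IndexError in both programs).
def Pre_zeroMatrixInplace (matrix : List (List Int)) : Prop :=
  matrix ≠ [] ∧ ∀ row ∈ matrix, matrix.headI.length ≤ row.length
instance (matrix : List (List Int)) : Decidable (Pre_zeroMatrixInplace matrix) := by
  unfold Pre_zeroMatrixInplace; infer_instance

def pvWitness_zeroMatrixInplace : List (List Int) := [[1, 0], [3, 4]]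

def Spec_zeroMatrixInplace (matrix : List (List Int)) (out : List (List Int)) : Prop := out = zeroMatrixInplace_alt matrix
instance (matrix : List (List Int)) (out : List (List Int)) : Decidable (Spec_zeroMatrixInplace matrix out) := by unfold Spec_zeroMatrixInplace; infer_instance

-- ===== CLAIM (what is proved, stated in full; the proofs are below) =====
def Claim_equal_zeroMatrixInplace : Prop := ∀ (matrix : List (List Int)), Dom_zeroMatrixInplace matrix → Pre_zeroMatrixInplace matrix → Spec_zeroMatrixInplace matrix (zeroMatrixInplace matrix)

-- ===== LEMMAS AND PROOFS =====

-- original-matrix cell as a total function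
def pvG (M : List (List Int)) (r c : Nat) : Int := (M.getD r []).getD c 0

-- "state s has m rows, row r keeps its length L r, the first n cells of row r are
-- described by f, and the cells from column n on are the untouched originals g0"
def CellEqZM (m n : Nat) (L : Nat → Nat) (g0 : Nat → Nat → Option Int)
    (s : List (List (Option Int))) (f : Nat → Nat → Option Int) : Prop :=
  s.length = m ∧ (∀ r, r < m → (s.getD r []).length = L r) ∧
    (∀ r, r < m → ∀ c, c < n → pvCell s r c = f r c) ∧
    (∀ r, r < m → ∀ c, n ≤ c → pvCell s r c = g0 r c)

theorem getD_set' {α : Type} (l : List α) (i j : Nat) (a d : α) :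
    (l.set i a).getD j d = if i = j ∧ i < l.length then a else l.getD j d := by
  simp [List.getD_eq_getElem?_getD, List.getElem?_set]
  split_ifs with h1 h2 h3 h4 <;> simp_all <;> omega

theorem cellEqZM_congr {m n : Nat} {L : Nat → Nat} {g0 : Nat → Nat → Option Int}
    {s : List (List (Option Int))}
    {f f' : Nat → Nat → Option Int} (h : CellEqZM m n L g0 s f)
    (hff : ∀ r, r < m → ∀ c, c < n → f r c = f' r c) : CellEqZM m n L g0 s f' := by
  obtain ⟨h1, h2, h3, h4⟩ := h
  exact ⟨h1, h2, fun r hr c hc => (h3 r hr c hc).trans (hff r hr c hc), h4⟩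

theorem setCell_cellEqZM {m n : Nat} {L : Nat → Nat} {g0 : Nat → Nat → Option Int}
    {s : List (List (Option Int))}
    {f : Nat → Nat → Option Int} {i j : Nat} (v : Option Int)
    (hi : i < m) (hj : j < n) (hL : ∀ r, r < m → n ≤ L r) (h : CellEqZM m n L g0 s f) :
    CellEqZM m n L g0 (pvSetCell s i j v) (fun r c => if r = i ∧ c = j then v else f r c) := by
  obtain ⟨h1, h2, h3, h4⟩ := h
  refine ⟨by simp [pvSetCell, h1], ?_, ?_, ?_⟩
  · intro r hr
    simp only [pvSetCell, getD_set']
    split_ifs with hcase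
    · rw [List.length_set, ← hcase.1]; exact h2 i hi
    · exact h2 r hr
  · intro r hr c hc
    simp only [pvCell, pvSetCell, getD_set']
    by_cases hri : i = r
    · subst hri
      rw [if_pos ⟨rfl, h1 ▸ hi⟩, getD_set']
      by_cases hcj : j = c
      · subst hcj
        rw [if_pos ⟨rfl, by rw [h2 i hi]; exact lt_of_lt_of_le hj (hL i hi)⟩,
          if_pos ⟨rfl, rfl⟩]
      · rw [if_neg (by intro hh; exact hcj hh.1),
            if_neg (by intro hh; exact hcj hh.2.symm)]
        exact h3 i hi c hc
    · rw [if_neg (by intro hh; exact hri hh.1),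
          if_neg (by intro hh; exact hri hh.1.symm)]
      exact h3 r hr c hc
  · intro r hr c hnc
    have hjc : ¬(j = c) := by omega
    rw [← h4 r hr c hnc]
    simp only [pvCell, pvSetCell, getD_set']
    by_cases hri : i = r
    · subst hri
      rw [if_pos ⟨rfl, h1 ▸ hi⟩, getD_set', if_neg (by intro hh; exact hjc hh.1)]
    · rw [if_neg (by intro hh; exact hri hh.1)]

-- visited-set predicate: cells processed strictly before (i, j) in row-major order
def pvVis (i j r c : Nat) : Bool := decide (r < i) || (decide (r = i) && decide (c < j))

-- invariant formula for the state of A's second double loop, visited set V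
def pvF (M : List (List Int)) (m n : Nat) (V : Nat → Nat → Bool) (r c : Nat) : Option Int :=
  if pvG M r c = 0 ∧ ¬ V r c then none
  else if pvG M r c = 0 ∨
      ((List.range n).any fun c' => V r c' && decide (pvG M r c' = 0)) = true ∨
      ((List.range m).any fun r' => V r' c && decide (pvG M r' c = 0)) = true then some 0
  else some (pvG M r c)

theorem pvF_congr {M : List (List Int)} {m n : Nat} {V V' : Nat → Nat → Bool}
    (h : ∀ r, r < m → ∀ c, c < n → V r c = V' r c) :
    ∀ r, r < m → ∀ c, c < n → pvF M m n V r c = pvF M m n V' r c := by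
  intro r hr c hc
  have e1 : V r c = V' r c := h r hr c hc
  have e2 : ((List.range n).any fun c' => V r c' && decide (pvG M r c' = 0)) =
      ((List.range n).any fun c' => V' r c' && decide (pvG M r c' = 0)) := by
    rw [Bool.eq_iff_iff]
    simp only [List.any_eq_true, List.mem_range]
    constructor
    · rintro ⟨x, hx, hvx⟩; exact ⟨x, hx, by rwa [← h r hr x hx]⟩
    · rintro ⟨x, hx, hvx⟩; exact ⟨x, hx, by rwa [h r hr x hx]⟩
  have e3 : ((List.range m).any fun r' => V r' c && decide (pvG M r' c = 0)) =
      ((List.range m).any fun r' => V' r' c && decide (pvG M r' c = 0)) := by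
    rw [Bool.eq_iff_iff]
    simp only [List.any_eq_true, List.mem_range]
    constructor
    · rintro ⟨x, hx, hvx⟩; exact ⟨x, hx, by rwa [← h x hx c hc]⟩
    · rintro ⟨x, hx, hvx⟩; exact ⟨x, hx, by rwa [h x hx c hc]⟩
  simp only [pvF, e1, e2, e3]

-- phase 1, one row prefix
theorem markRow_cellEqZM {M : List (List Int)} {m n : Nat} {L : Nat → Nat} {g0 : Nat → Nat → Option Int} {i : Nat} (hi : i < m)
    (hL : ∀ r, r < m → n ≤ L r) :
    ∀ (j : Nat), j ≤ n → ∀ {s : List (List (Option Int))} {f : Nat → Nat → Option Int},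
      CellEqZM m n L g0 s f →
      CellEqZM m n L g0 ((List.range j).foldl (fun s j => pvMark s i j) s)
        (fun r c => if r = i ∧ c < j ∧ f i c = some 0 then none else f r c) := by
  intro j
  induction j with
  | zero =>
    intro _ s f h
    simpa using cellEqZM_congr h (by intro r hr c hc; simp)
  | succ j ih =>
    intro hj s f h
    have hjn : j < n := by omega
    have hprev := ih (by omega) h
    rw [List.range_succ, List.foldl_append]
    simp only [List.foldl_cons, List.foldl_nil]
    set fj : Nat → Nat → Option Int :=
      fun r c => if r = i ∧ c < j ∧ f i c = some 0 then none else f r c with hfj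
    have hcellij : pvCell ((List.range j).foldl (fun s j => pvMark s i j) s) i j = f i j := by
      rw [hprev.2.2.1 i hi j hjn]; simp [hfj]
    by_cases hf : f i j = some 0
    · have : pvMark ((List.range j).foldl (fun s j => pvMark s i j) s) i j =
          pvSetCell ((List.range j).foldl (fun s j => pvMark s i j) s) i j none := by
        rw [pvMark, if_pos (by rw [hcellij, hf])]
      rw [this]
      refine cellEqZM_congr (setCell_cellEqZM none hi hjn hL hprev) ?_
      intro r hr c hc
      by_cases hri : r = i
      · subst hri
        by_cases hcj : c = j
        · subst hcj; simp [hfj, hf]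
        · have hlt : c < j + 1 ↔ c < j := by omega
          simp [hfj, hcj, hlt]
      · simp [hfj, hri]
    · have : pvMark ((List.range j).foldl (fun s j => pvMark s i j) s) i j =
          (List.range j).foldl (fun s j => pvMark s i j) s := by
        rw [pvMark, if_neg (by rw [hcellij]; exact hf)]
      rw [this]
      refine cellEqZM_congr hprev ?_
      intro r hr c hc
      by_cases hri : r = i
      · subst hri
        by_cases hcj : c = j
        · subst hcj; simp [hfj, hf]
        · have hlt : c < j + 1 ↔ c < j := by omega
          simp [hfj, hcj, hlt]
      · simp [hfj, hri]

-- phase 1, all rows prefix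
theorem markAll_cellEqZM {M : List (List Int)} {m n : Nat} {L : Nat → Nat} {g0 : Nat → Nat → Option Int} (hL : ∀ r, r < m → n ≤ L r) :
    ∀ (i : Nat), i ≤ m → ∀ {s : List (List (Option Int))} {f : Nat → Nat → Option Int},
      CellEqZM m n L g0 s f →
      CellEqZM m n L g0 ((List.range i).foldl (fun s i =>
          (List.range n).foldl (fun s j => pvMark s i j) s) s)
        (fun r c => if r < i ∧ f r c = some 0 then none else f r c) := by
  intro i
  induction i with
  | zero =>
    intro _ s f h
    simpa using cellEqZM_congr h (by intro r hr c hc; simp)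
  | succ i ih =>
    intro him s f h
    have hi : i < m := by omega
    have hprev := ih (by omega) h
    rw [List.range_succ, List.foldl_append]
    simp only [List.foldl_cons, List.foldl_nil]
    refine cellEqZM_congr (markRow_cellEqZM (M := M) hi hL n le_rfl hprev) ?_
    intro r hr c hc
    by_cases hri : r = i
    · subst hri
      have h1 : ¬ (r < r) := lt_irrefl r
      have h2 : r < r + 1 := Nat.lt_succ_self r
      simp [h1, h2, hc]
    · have hlt : r < i + 1 ↔ r < i := by omega
      simp [hri, hlt]

theorem zeroRow_cellEqZM {m n : Nat} {L : Nat → Nat} {g0 : Nat → Nat → Option Int} {i : Nat} (hi : i < m)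
    (hL : ∀ r, r < m → n ≤ L r) :
    ∀ (k : Nat), k ≤ n → ∀ {s : List (List (Option Int))} {f : Nat → Nat → Option Int},
      CellEqZM m n L g0 s f →
      CellEqZM m n L g0 ((List.range k).foldl (fun s col =>
          if pvCell s i col ≠ none then pvSetCell s i col (some 0) else s) s)
        (fun r c => if r = i ∧ c < k ∧ f i c ≠ none then some 0 else f r c) := by
  intro k
  induction k with
  | zero =>
    intro _ s f h
    simpa using cellEqZM_congr h (by intro r hr c hc; simp)
  | succ k ih =>
    intro hk s f h
    have hkn : k < n := by omega
    have hprev := ih (by omega) h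
    rw [List.range_succ, List.foldl_append]
    simp only [List.foldl_cons, List.foldl_nil]
    set body : List (List (Option Int)) → Nat → List (List (Option Int)) :=
      fun s col => if pvCell s i col ≠ none then pvSetCell s i col (some 0) else s with hbody
    set fk : Nat → Nat → Option Int :=
      fun r c => if r = i ∧ c < k ∧ f i c ≠ none then some 0 else f r c with hfk
    have hcellik : pvCell ((List.range k).foldl body s) i k = f i k := by
      rw [hprev.2.2.1 i hi k hkn]; simp [hfk]
    by_cases hf : f i k = none
    · rw [if_neg (by rw [hcellik, hf]; simp)]
      refine cellEqZM_congr hprev ?_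
      intro r hr c hc
      by_cases hri : r = i
      · subst hri
        by_cases hck : c = k
        · subst hck; simp [hfk, hf]
        · have hlt : c < k + 1 ↔ c < k := by omega
          simp [hfk, hck, hlt]
      · simp [hfk, hri]
    · rw [if_pos (by rw [hcellik]; simpa using hf)]
      refine cellEqZM_congr (setCell_cellEqZM (some 0) hi hkn hL hprev) ?_
      intro r hr c hc
      by_cases hri : r = i
      · subst hri
        by_cases hck : c = k
        · subst hck; simp [hfk, hf]
        · have hlt : c < k + 1 ↔ c < k := by omega
          simp [hfk, hck, hlt]
      · simp [hfk, hri]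

theorem zeroCol_cellEqZM {m n : Nat} {L : Nat → Nat} {g0 : Nat → Nat → Option Int} {j : Nat} (hj : j < n)
    (hL : ∀ r, r < m → n ≤ L r) :
    ∀ (k : Nat), k ≤ m → ∀ {s : List (List (Option Int))} {f : Nat → Nat → Option Int},
      CellEqZM m n L g0 s f →
      CellEqZM m n L g0 ((List.range k).foldl (fun s row =>
          if pvCell s row j ≠ none then pvSetCell s row j (some 0) else s) s)
        (fun r c => if c = j ∧ r < k ∧ f r j ≠ none then some 0 else f r c) := by
  intro k
  induction k with
  | zero =>
    intro _ s f h
    simpa using cellEqZM_congr h (by intro r hr c hc; simp)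
  | succ k ih =>
    intro hk s f h
    have hkm : k < m := by omega
    have hprev := ih (by omega) h
    rw [List.range_succ, List.foldl_append]
    simp only [List.foldl_cons, List.foldl_nil]
    set body : List (List (Option Int)) → Nat → List (List (Option Int)) :=
      fun s row => if pvCell s row j ≠ none then pvSetCell s row j (some 0) else s with hbody
    set fk : Nat → Nat → Option Int :=
      fun r c => if c = j ∧ r < k ∧ f r j ≠ none then some 0 else f r c with hfk
    have hcellkj : pvCell ((List.range k).foldl body s) k j = f k j := by
      rw [hprev.2.2.1 k hkm j hj]; simp [hfk]
    by_cases hf : f k j = none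
    · rw [if_neg (by rw [hcellkj, hf]; simp)]
      refine cellEqZM_congr hprev ?_
      intro r hr c hc
      by_cases hcj : c = j
      · subst hcj
        by_cases hrk : r = k
        · subst hrk; simp [hfk, hf]
        · have hlt : r < k + 1 ↔ r < k := by omega
          simp [hfk, hrk, hlt]
      · simp [hfk, hcj]
    · rw [if_pos (by rw [hcellkj]; simpa using hf)]
      refine cellEqZM_congr (setCell_cellEqZM (some 0) hkm hj hL hprev) ?_
      intro r hr c hc
      by_cases hcj : c = j
      · subst hcj
        by_cases hrk : r = k
        · subst hrk; simp [hfk, hf]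
        · have hlt : r < k + 1 ↔ r < k := by omega
          simp [hfk, hrk, hlt]
      · simp [hfk, hcj]

theorem pvF_eq_none_iff {M : List (List Int)} {m n : Nat} {V : Nat → Nat → Bool} {r c : Nat} :
    pvF M m n V r c = none ↔ (pvG M r c = 0 ∧ V r c = false) := by
  rw [pvF]
  split_ifs with h1 h2 <;> simp_all

theorem process_cellEqZM {M : List (List Int)} {m n : Nat} {L : Nat → Nat} {g0 : Nat → Nat → Option Int} {s : List (List (Option Int))}
    {i j : Nat} (hi : i < m) (hj : j < n) (hL : ∀ r, r < m → n ≤ L r)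
    (h : CellEqZM m n L g0 s (pvF M m n (pvVis i j))) :
    CellEqZM m n L g0 (pvProcess m n s i j) (pvF M m n (pvVis i (j + 1))) := by
  have hVsucc : ∀ r c, (pvVis i (j + 1) r c = true) ↔
      (pvVis i j r c = true ∨ (r = i ∧ c = j)) := by
    intro r c; simp [pvVis] <;> omega
  by_cases hg : pvG M i j = 0
  · -- the visited cell is a marked zero: A zeroes its row, its column and the cell itself
    have hVii : pvVis i j i j = false := by simp [pvVis] <;> omega
    have hFij : pvF M m n (pvVis i j) i j = none := pvF_eq_none_iff.mpr ⟨hg, hVii⟩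
    have hcell : pvCell s i j = none := by rw [h.2.2.1 i hi j hj]; exact hFij
    have hAnyRow : ∀ r,
        (((List.range n).any fun c' => pvVis i (j + 1) r c' && decide (pvG M r c' = 0)) = true) ↔
        ((((List.range n).any fun c' => pvVis i j r c' && decide (pvG M r c' = 0)) = true) ∨ r = i) := by
      intro r
      simp only [List.any_eq_true, List.mem_range, Bool.and_eq_true, decide_eq_true_eq]
      constructor
      · rintro ⟨x, hx, hvx, hgx⟩
        rcases (hVsucc r x).mp hvx with hv | ⟨hri, hxj⟩
        · exact Or.inl ⟨x, hx, hv, hgx⟩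
        · exact Or.inr hri
      · rintro (⟨x, hx, hvx, hgx⟩ | hri)
        · exact ⟨x, hx, (hVsucc r x).mpr (Or.inl hvx), hgx⟩
        · exact ⟨j, hj, (hVsucc r j).mpr (Or.inr ⟨hri, rfl⟩), by rw [hri]; exact hg⟩
    have hAnyCol : ∀ c,
        (((List.range m).any fun r' => pvVis i (j + 1) r' c && decide (pvG M r' c = 0)) = true) ↔
        ((((List.range m).any fun r' => pvVis i j r' c && decide (pvG M r' c = 0)) = true) ∨ c = j) := by
      intro c
      simp only [List.any_eq_true, List.mem_range, Bool.and_eq_true, decide_eq_true_eq]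
      constructor
      · rintro ⟨x, hx, hvx, hgx⟩
        rcases (hVsucc x c).mp hvx with hv | ⟨hxi, hcj⟩
        · exact Or.inl ⟨x, hx, hv, hgx⟩
        · exact Or.inr hcj
      · rintro (⟨x, hx, hvx, hgx⟩ | hcj)
        · exact ⟨x, hx, (hVsucc x c).mpr (Or.inl hvx), hgx⟩
        · exact ⟨i, hi, (hVsucc i c).mpr (Or.inr ⟨rfl, hcj⟩), by rw [hcj]; exact hg⟩
    rw [pvProcess, if_pos hcell]
    have h1 : CellEqZM m n L g0 (pvZeroRow n i s)
        (fun r c => if r = i ∧ c < n ∧ pvF M m n (pvVis i j) i c ≠ none then some 0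
          else pvF M m n (pvVis i j) r c) := by
      unfold pvZeroRow; exact zeroRow_cellEqZM hi hL n le_rfl h
    have h2 : CellEqZM m n L g0 (pvZeroCol m j (pvZeroRow n i s))
        (fun r c => if c = j ∧ r < m ∧
            (if r = i ∧ j < n ∧ pvF M m n (pvVis i j) i j ≠ none then some 0
              else pvF M m n (pvVis i j) r j) ≠ none then some 0
          else if r = i ∧ c < n ∧ pvF M m n (pvVis i j) i c ≠ none then some 0
          else pvF M m n (pvVis i j) r c) := by
      unfold pvZeroCol; exact zeroCol_cellEqZM hj hL m le_rfl h1
    refine cellEqZM_congr (setCell_cellEqZM (some 0) hi hj hL h2) ?_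
    intro r hr c hc
    by_cases hri : r = i
    · subst hri
      by_cases hcj : c = j
      · subst hcj
        -- the processed cell itself: both sides are some 0
        rw [if_pos ⟨rfl, rfl⟩, pvF]
        rw [if_neg (by simp [hVsucc]), if_pos (Or.inl hg)]
      · -- same row: A zeroed it unless it is still a marked, unvisited zero
        rw [if_neg (by rintro ⟨_, hh⟩; exact hcj hh)]
        rw [if_neg (by rintro ⟨hh, _⟩; exact hcj hh)]
        by_cases hnone : pvF M m n (pvVis r j) r c = none
        · rw [if_neg (by rintro ⟨_, _, hh⟩; exact hh hnone), hnone]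
          obtain ⟨hg2, hv2⟩ := pvF_eq_none_iff.mp hnone
          symm
          refine pvF_eq_none_iff.mpr ⟨hg2, ?_⟩
          rw [Bool.eq_false_iff]
          intro hv'
          rcases (hVsucc r c).mp hv' with hv | ⟨_, hcj'⟩
          · rw [hv2] at hv; exact Bool.false_ne_true hv
          · exact hcj hcj'
        · rw [if_pos ⟨rfl, hc, hnone⟩, pvF]
          have hc1 : ¬(pvG M r c = 0 ∧ ¬(pvVis r (j + 1) r c = true)) := by
            rintro ⟨hg2, hv2⟩
            exact hnone (pvF_eq_none_iff.mpr ⟨hg2, by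
              rw [Bool.eq_false_iff]; intro hv
              exact hv2 ((hVsucc r c).mpr (Or.inl hv))⟩)
          rw [if_neg hc1, if_pos (Or.inr (Or.inl ((hAnyRow r).mpr (Or.inr rfl))))]
    · -- other rows: only column j is affected
      rw [if_neg (by rintro ⟨hh, _⟩; exact hri hh)]
      by_cases hcj : c = j
      · subst hcj
        have hinner : (if r = i ∧ c < n ∧ pvF M m n (pvVis i c) i c ≠ none then some (0 : Int)
            else pvF M m n (pvVis i c) r c) = pvF M m n (pvVis i c) r c := by
          rw [if_neg (by rintro ⟨hh, _⟩; exact hri hh)]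
        rw [hinner]
        by_cases hnone : pvF M m n (pvVis i c) r c = none
        · rw [if_neg (by rintro ⟨_, _, hh⟩; exact hh hnone), hnone]
          obtain ⟨hg2, hv2⟩ := pvF_eq_none_iff.mp hnone
          symm
          refine pvF_eq_none_iff.mpr ⟨hg2, ?_⟩
          rw [Bool.eq_false_iff]
          intro hv'
          rcases (hVsucc r c).mp hv' with hv | ⟨hri', _⟩
          · rw [hv2] at hv; exact Bool.false_ne_true hv
          · exact hri hri'
        · rw [if_pos ⟨rfl, hr, hnone⟩, pvF]
          have hc1 : ¬(pvG M r c = 0 ∧ ¬(pvVis i (c + 1) r c = true)) := by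
            rintro ⟨hg2, hv2⟩
            exact hnone (pvF_eq_none_iff.mpr ⟨hg2, by
              rw [Bool.eq_false_iff]; intro hv
              exact hv2 ((hVsucc r c).mpr (Or.inl hv))⟩)
          rw [if_neg hc1, if_pos (Or.inr (Or.inr ((hAnyCol c).mpr (Or.inr rfl))))]
      · -- untouched cell: the invariant formula is unchanged
        rw [if_neg (by rintro ⟨hh, _⟩; exact hcj hh)]
        rw [if_neg (by rintro ⟨hh, _⟩; exact hri hh)]
        have eV : (pvVis i j r c = true) ↔ (pvVis i (j + 1) r c = true) :=
          ⟨fun hv => (hVsucc r c).mpr (Or.inl hv),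
           fun hv' => ((hVsucc r c).mp hv').resolve_right (fun hh => hri hh.1)⟩
        rw [pvF, pvF]
        exact if_congr (and_congr_right fun _ => not_congr eV) rfl
          (if_congr (or_congr_right (or_congr
            ((hAnyRow r).trans (or_iff_left hri)).symm
            ((hAnyCol c).trans (or_iff_left hcj)).symm)) rfl rfl)
  · -- the visited cell is not a marked zero: state and formula are both unchanged
    have hcell : pvCell s i j ≠ none := by
      rw [h.2.2.1 i hi j hj]
      intro hn
      exact hg (pvF_eq_none_iff.mp hn).1
    rw [pvProcess, if_neg hcell]
    refine cellEqZM_congr h ?_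
    intro r hr c hc
    have e1 : (pvG M r c = 0 ∧ ¬(pvVis i j r c = true)) ↔
        (pvG M r c = 0 ∧ ¬(pvVis i (j + 1) r c = true)) := by
      constructor
      · rintro ⟨hg2, hv⟩
        refine ⟨hg2, fun hv' => ?_⟩
        rcases (hVsucc r c).mp hv' with h' | ⟨hri, hcj⟩
        · exact hv h'
        · subst hri; subst hcj; exact hg hg2
      · rintro ⟨hg2, hv⟩
        exact ⟨hg2, fun h' => hv ((hVsucc r c).mpr (Or.inl h'))⟩
    have e2 : (((List.range n).any fun c' => pvVis i j r c' && decide (pvG M r c' = 0)) = true) ↔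
        (((List.range n).any fun c' => pvVis i (j + 1) r c' && decide (pvG M r c' = 0)) = true) := by
      simp only [List.any_eq_true, List.mem_range, Bool.and_eq_true, decide_eq_true_eq]
      constructor
      · rintro ⟨x, hx, hvx, hgx⟩
        exact ⟨x, hx, (hVsucc r x).mpr (Or.inl hvx), hgx⟩
      · rintro ⟨x, hx, hvx, hgx⟩
        rcases (hVsucc r x).mp hvx with hv | ⟨hri, hxj⟩
        · exact ⟨x, hx, hv, hgx⟩
        · subst hri; subst hxj; exact absurd hgx hg
    have e3 : (((List.range m).any fun r' => pvVis i j r' c && decide (pvG M r' c = 0)) = true) ↔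
        (((List.range m).any fun r' => pvVis i (j + 1) r' c && decide (pvG M r' c = 0)) = true) := by
      simp only [List.any_eq_true, List.mem_range, Bool.and_eq_true, decide_eq_true_eq]
      constructor
      · rintro ⟨x, hx, hvx, hgx⟩
        exact ⟨x, hx, (hVsucc x c).mpr (Or.inl hvx), hgx⟩
      · rintro ⟨x, hx, hvx, hgx⟩
        rcases (hVsucc x c).mp hvx with hv | ⟨hxi, hxj⟩
        · exact ⟨x, hx, hv, hgx⟩
        · subst hxi; subst hxj; exact absurd hgx hg
    rw [pvF, pvF]
    exact if_congr e1 rfl (if_congr (or_congr_right (or_congr e2 e3)) rfl rfl)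

theorem procRow_cellEqZM {M : List (List Int)} {m n : Nat} {L : Nat → Nat} {g0 : Nat → Nat → Option Int} {i : Nat} (hi : i < m)
    (hL : ∀ r, r < m → n ≤ L r) :
    ∀ (j : Nat), j ≤ n → ∀ {s : List (List (Option Int))},
      CellEqZM m n L g0 s (pvF M m n (pvVis i 0)) →
      CellEqZM m n L g0 ((List.range j).foldl (fun s j => pvProcess m n s i j) s)
        (pvF M m n (pvVis i j)) := by
  intro j
  induction j with
  | zero => intro _ s h; simpa using h
  | succ j ih =>
    intro hj s h
    rw [List.range_succ, List.foldl_append]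
    simp only [List.foldl_cons, List.foldl_nil]
    exact process_cellEqZM hi (by omega) hL (ih (by omega) h)

theorem procAll_cellEqZM {M : List (List Int)} {m n : Nat} {L : Nat → Nat} {g0 : Nat → Nat → Option Int} (hL : ∀ r, r < m → n ≤ L r) :
    ∀ (i : Nat), i ≤ m → ∀ {s : List (List (Option Int))},
      CellEqZM m n L g0 s (pvF M m n (pvVis 0 0)) →
      CellEqZM m n L g0 ((List.range i).foldl (fun s i =>
          (List.range n).foldl (fun s j => pvProcess m n s i j) s) s)
        (pvF M m n (pvVis i 0)) := by
  intro i
  induction i with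
  | zero => intro _ s h; simpa using h
  | succ i ih =>
    intro him s h
    have hi : i < m := by omega
    rw [List.range_succ, List.foldl_append]
    simp only [List.foldl_cons, List.foldl_nil]
    refine cellEqZM_congr (procRow_cellEqZM hi hL n le_rfl (ih (by omega) h)) (pvF_congr ?_)
    intro r hr c hc
    rw [Bool.eq_iff_iff]
    simp only [pvVis, Bool.or_eq_true, Bool.and_eq_true, decide_eq_true_eq]
    omega

theorem mapRow_getD (M : List (List Int)) (r : Nat) :
    (M.map (fun r => r.map some)).getD r [] = (M.getD r []).map some := by
  simp only [List.getD_eq_getElem?_getD, List.getElem?_map]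
  cases M[r]? <;> simp

theorem init_cellEqZM {M : List (List Int)} {m n : Nat} (hm : M.length = m)
    (rect : ∀ row ∈ M, n ≤ row.length) :
    CellEqZM m n (fun r => (M.getD r []).length)
      (fun r c => ((M.getD r []).map some).getD c none)
      (M.map (fun r => r.map some)) (fun r c => some (pvG M r c)) := by
  refine ⟨by simp [hm], ?_, ?_, ?_⟩
  · intro r hr
    rw [mapRow_getD, List.length_map]
  · intro r hr c hc
    have hrM : r < M.length := hm ▸ hr
    have hrow : M.getD r [] = M[r] := by
      rw [List.getD_eq_getElem?_getD, List.getElem?_eq_getElem hrM]; rfl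
    have hcM : c < M[r].length := lt_of_lt_of_le hc (rect M[r] (List.getElem_mem hrM))
    simp only [pvCell, pvG, mapRow_getD, hrow]
    simp [List.getD_eq_getElem?_getD, List.getElem?_map, List.getElem?_eq_getElem hcM]
  · intro r hr c hnc
    rw [pvCell, mapRow_getD]

theorem pvCell_getElem {s : List (List (Option Int))} {r c : Nat}
    (hr : r < s.length) (hc : c < s[r].length) : pvCell s r c = s[r][c] := by
  simp [pvCell, List.getD_eq_getElem?_getD, List.getElem?_eq_getElem hr,
    List.getElem?_eq_getElem hc]

theorem pvG_getElem {M : List (List Int)} {r c : Nat}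
    (hr : r < M.length) (hc : c < M[r].length) : pvG M r c = M[r][c] := by
  simp [pvG, List.getD_eq_getElem?_getD, List.getElem?_eq_getElem hr,
    List.getElem?_eq_getElem hc]

-- ----- B-side lemmas -----

-- membership in the row/column sets after B's inner scan of row i
theorem buildInner_mem (M : List (List Int)) (i : Nat) :
    ∀ (k : Nat) (p : PySem.Set Int × PySem.Set Int) (x : Int),
      (x ∈ ((List.range k).foldl (fun p j =>
          if (M.getD i []).getD j 0 = 0 then
            (PySem.Set.add p.1 (i : Int), PySem.Set.add p.2 (j : Int))
          else p) p).1 ↔ x ∈ p.1 ∨ (x = (i : Int) ∧ ∃ j, j < k ∧ pvG M i j = 0)) ∧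
      (x ∈ ((List.range k).foldl (fun p j =>
          if (M.getD i []).getD j 0 = 0 then
            (PySem.Set.add p.1 (i : Int), PySem.Set.add p.2 (j : Int))
          else p) p).2 ↔ x ∈ p.2 ∨ (∃ j, j < k ∧ x = (j : Int) ∧ pvG M i j = 0)) := by
  intro k
  induction k with
  | zero =>
    intro p x
    constructor
    · simp
    · simp
  | succ k ih =>
    intro p x
    rw [List.range_succ, List.foldl_append]
    simp only [List.foldl_cons, List.foldl_nil]
    obtain ⟨ih1, ih2⟩ := ih p x
    by_cases hg : pvG M i k = 0
    · rw [if_pos (by simpa [pvG] using hg)]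
      constructor
      · simp only [PySem.Set.mem_add, ih1]
        constructor
        · rintro ((h | h) | h)
          · exact Or.inl h
          · exact Or.inr ⟨h.1, h.2.choose, by omega, h.2.choose_spec.2⟩
          · exact Or.inr ⟨h, k, by omega, hg⟩
        · rintro (h | ⟨hx, j, hj, hgj⟩)
          · exact Or.inl (Or.inl h)
          · by_cases hjk : j = k
            · exact Or.inr hx
            · exact Or.inl (Or.inr ⟨hx, j, by omega, hgj⟩)
      · simp only [PySem.Set.mem_add, ih2]
        constructor
        · rintro ((h | h) | h)
          · exact Or.inl h
          · exact Or.inr ⟨h.choose, by omega, h.choose_spec.2⟩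
          · exact Or.inr ⟨k, by omega, h, hg⟩
        · rintro (h | ⟨j, hj, hx, hgj⟩)
          · exact Or.inl (Or.inl h)
          · by_cases hjk : j = k
            · subst hjk; exact Or.inr hx
            · exact Or.inl (Or.inr ⟨j, by omega, hx, hgj⟩)
    · rw [if_neg (by simpa [pvG] using hg)]
      constructor
      · rw [ih1]
        constructor
        · rintro (h | h)
          · exact Or.inl h
          · exact Or.inr ⟨h.1, h.2.choose, by omega, h.2.choose_spec.2⟩
        · rintro (h | ⟨hx, j, hj, hgj⟩)
          · exact Or.inl h
          · by_cases hjk : j = k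
            · subst hjk; exact absurd hgj hg
            · exact Or.inr ⟨hx, j, by omega, hgj⟩
      · rw [ih2]
        constructor
        · rintro (h | h)
          · exact Or.inl h
          · exact Or.inr ⟨h.choose, by omega, h.choose_spec.2⟩
        · rintro (h | ⟨j, hj, hx, hgj⟩)
          · exact Or.inl h
          · by_cases hjk : j = k
            · subst hjk; exact absurd hgj hg
            · exact Or.inr ⟨j, by omega, hx, hgj⟩

-- membership after B's full first double loop
theorem buildAll_mem (M : List (List Int)) (n : Nat) :
    ∀ (m : Nat) (p : PySem.Set Int × PySem.Set Int) (x : Int),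
      (x ∈ ((List.range m).foldl (fun p i =>
          (List.range n).foldl (fun p j =>
            if (M.getD i []).getD j 0 = 0 then
              (PySem.Set.add p.1 (i : Int), PySem.Set.add p.2 (j : Int))
            else p) p) p).1 ↔
        x ∈ p.1 ∨ (∃ i, i < m ∧ x = (i : Int) ∧ ∃ j, j < n ∧ pvG M i j = 0)) ∧
      (x ∈ ((List.range m).foldl (fun p i =>
          (List.range n).foldl (fun p j =>
            if (M.getD i []).getD j 0 = 0 then
              (PySem.Set.add p.1 (i : Int), PySem.Set.add p.2 (j : Int))
            else p) p) p).2 ↔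
        x ∈ p.2 ∨ (∃ j, j < n ∧ x = (j : Int) ∧ ∃ i, i < m ∧ pvG M i j = 0)) := by
  intro m
  induction m with
  | zero =>
    intro p x
    constructor
    · simp
    · simp
  | succ m ih =>
    intro p x
    rw [List.range_succ, List.foldl_append]
    simp only [List.foldl_cons, List.foldl_nil]
    obtain ⟨h1, h2⟩ := buildInner_mem M m n ((List.range m).foldl (fun p i =>
        (List.range n).foldl (fun p j =>
          if (M.getD i []).getD j 0 = 0 then
            (PySem.Set.add p.1 (i : Int), PySem.Set.add p.2 (j : Int))
          else p) p) p) x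
    obtain ⟨ih1, ih2⟩ := ih p x
    constructor
    · rw [h1, ih1]
      constructor
      · rintro ((h | ⟨i, hi, hx, hj⟩) | ⟨hx, hj⟩)
        · exact Or.inl h
        · exact Or.inr ⟨i, by omega, hx, hj⟩
        · exact Or.inr ⟨m, by omega, hx, hj⟩
      · rintro (h | ⟨i, hi, hx, hj⟩)
        · exact Or.inl (Or.inl h)
        · by_cases him : i = m
          · subst him; exact Or.inr ⟨hx, hj⟩
          · exact Or.inl (Or.inr ⟨i, by omega, hx, hj⟩)
    · rw [h2, ih2]
      constructor
      · rintro ((h | ⟨j, hj, hx, i, hi, hg⟩) | ⟨j, hj, hx, hg⟩)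
        · exact Or.inl h
        · exact Or.inr ⟨j, hj, hx, i, by omega, hg⟩
        · exact Or.inr ⟨j, hj, hx, m, by omega, hg⟩
      · rintro (h | ⟨j, hj, hx, i, hi, hg⟩)
        · exact Or.inl (Or.inl h)
        · by_cases him : i = m
          · subst him; exact Or.inr ⟨j, hj, hx, hg⟩
          · exact Or.inl (Or.inr ⟨j, hj, hx, i, by omega, hg⟩)

-- "state s (a plain int matrix) has m rows, row r keeps its length L r, the first n cells
-- of row r are described by f, and the cells from column n on are the untouched originals g0"
def CellW (m n : Nat) (L : Nat → Nat) (g0 : Nat → Nat → Int)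
    (s : List (List Int)) (f : Nat → Nat → Int) : Prop :=
  s.length = m ∧ (∀ r, r < m → (s.getD r []).length = L r) ∧
    (∀ r, r < m → ∀ c, c < n → pvG s r c = f r c) ∧
    (∀ r, r < m → ∀ c, n ≤ c → pvG s r c = g0 r c)

theorem cellW_congr {m n : Nat} {L : Nat → Nat} {g0 : Nat → Nat → Int}
    {s : List (List Int)} {f f' : Nat → Nat → Int} (h : CellW m n L g0 s f)
    (hff : ∀ r, r < m → ∀ c, c < n → f r c = f' r c) : CellW m n L g0 s f' := by
  obtain ⟨h1, h2, h3, h4⟩ := h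
  exact ⟨h1, h2, fun r hr c hc => (h3 r hr c hc).trans (hff r hr c hc), h4⟩

theorem pvZero_cellW {m n : Nat} {L : Nat → Nat} {g0 : Nat → Nat → Int}
    {s : List (List Int)} {f : Nat → Nat → Int} {i j : Nat}
    (hi : i < m) (hj : j < n) (hL : ∀ r, r < m → n ≤ L r) (h : CellW m n L g0 s f) :
    CellW m n L g0 (pvZero s i j) (fun r c => if r = i ∧ c = j then 0 else f r c) := by
  obtain ⟨h1, h2, h3, h4⟩ := h
  refine ⟨by simp [pvZero, h1], ?_, ?_, ?_⟩
  · intro r hr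
    simp only [pvZero, getD_set']
    split_ifs with hcase
    · rw [List.length_set, ← hcase.1]; exact h2 i hi
    · exact h2 r hr
  · intro r hr c hc
    simp only [pvG, pvZero, getD_set']
    by_cases hri : i = r
    · subst hri
      rw [if_pos ⟨rfl, h1 ▸ hi⟩, getD_set']
      by_cases hcj : j = c
      · subst hcj
        rw [if_pos ⟨rfl, by rw [h2 i hi]; exact lt_of_lt_of_le hj (hL i hi)⟩,
          if_pos ⟨rfl, rfl⟩]
      · rw [if_neg (by intro hh; exact hcj hh.1),
            if_neg (by intro hh; exact hcj hh.2.symm)]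
        exact h3 i hi c hc
    · rw [if_neg (by intro hh; exact hri hh.1),
          if_neg (by intro hh; exact hri hh.1.symm)]
      exact h3 r hr c hc
  · intro r hr c hnc
    have hjc : ¬(j = c) := by omega
    rw [← h4 r hr c hnc]
    simp only [pvG, pvZero, getD_set']
    by_cases hri : i = r
    · subst hri
      rw [if_pos ⟨rfl, h1 ▸ hi⟩, getD_set', if_neg (by intro hh; exact hjc hh.1)]
    · rw [if_neg (by intro hh; exact hri hh.1)]

-- B's inner write loop over row i, columns < k
theorem writeRow_cellW {m n : Nat} {L : Nat → Nat} {g0 : Nat → Nat → Int}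
    {cond : Nat → Nat → Bool} {i : Nat} (hi : i < m) (hL : ∀ r, r < m → n ≤ L r) :
    ∀ (k : Nat), k ≤ n → ∀ {s : List (List Int)} {f : Nat → Nat → Int},
      CellW m n L g0 s f →
      CellW m n L g0 ((List.range k).foldl (fun s j =>
          if cond i j then pvZero s i j else s) s)
        (fun r c => if r = i ∧ c < k ∧ cond i c then 0 else f r c) := by
  intro k
  induction k with
  | zero =>
    intro _ s f h
    simpa using cellW_congr h (by intro r hr c hc; simp)
  | succ k ih =>
    intro hk s f h
    have hkn : k < n := by omega
    have hprev := ih (by omega) h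
    rw [List.range_succ, List.foldl_append]
    simp only [List.foldl_cons, List.foldl_nil]
    by_cases hc : cond i k = true
    · rw [if_pos hc]
      refine cellW_congr (pvZero_cellW hi hkn hL hprev) ?_
      intro r hr c hcn
      by_cases hri : r = i
      · subst hri
        by_cases hck : c = k
        · subst hck; simp [hc]
        · have hlt : c < k + 1 ↔ c < k := by omega
          simp [hck, hlt]
      · simp [hri]
    · rw [if_neg hc]
      refine cellW_congr hprev ?_
      intro r hr c hcn
      by_cases hri : r = i
      · subst hri
        by_cases hck : c = k
        · subst hck; simp [hc]
        · have hlt : c < k + 1 ↔ c < k := by omega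
          simp [hck, hlt]
      · simp [hri]

-- B's full second double loop
theorem writeAll_cellW {m n : Nat} {L : Nat → Nat} {g0 : Nat → Nat → Int}
    {cond : Nat → Nat → Bool} (hL : ∀ r, r < m → n ≤ L r) :
    ∀ (i : Nat), i ≤ m → ∀ {s : List (List Int)} {f : Nat → Nat → Int},
      CellW m n L g0 s f →
      CellW m n L g0 ((List.range i).foldl (fun s i =>
          (List.range n).foldl (fun s j => if cond i j then pvZero s i j else s) s) s)
        (fun r c => if r < i ∧ cond r c then 0 else f r c) := by
  intro i
  induction i with
  | zero =>
    intro _ s f h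
    simpa using cellW_congr h (by intro r hr c hc; simp)
  | succ i ih =>
    intro him s f h
    have hi : i < m := by omega
    have hprev := ih (by omega) h
    rw [List.range_succ, List.foldl_append]
    simp only [List.foldl_cons, List.foldl_nil]
    refine cellW_congr (writeRow_cellW hi hL n le_rfl hprev) ?_
    intro r hr c hc
    by_cases hri : r = i
    · subst hri
      have h1 : ¬ (r < r) := lt_irrefl r
      have h2 : r < r + 1 := Nat.lt_succ_self r
      simp [h1, h2, hc]
    · have hlt : r < i + 1 ↔ r < i := by omega
      simp [hri, hlt]

theorem AB_main (M : List (List Int)) (hne : M ≠ [])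
    (rect : ∀ row ∈ M, M.headI.length ≤ row.length) :
    zeroMatrixInplace M = zeroMatrixInplace_alt M := by
  have hrowlenM : ∀ r (hr : r < M.length), M.headI.length ≤ M[r].length := fun r hr =>
    rect M[r] (List.getElem_mem hr)
  -- A's working state after both double loops, via the invariant chain
  have h0 := init_cellEqZM (M := M) (m := M.length) (n := M.headI.length) rfl rect
  have hL : ∀ r, r < M.length → M.headI.length ≤ (M.getD r []).length := by
    intro r hr
    have hrow : M.getD r [] = M[r] := by
      rw [List.getD_eq_getElem?_getD, List.getElem?_eq_getElem hr]; rfl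
    rw [hrow]
    exact hrowlenM r hr
  have h1 := markAll_cellEqZM (M := M) (m := M.length) (n := M.headI.length) hL
    M.length le_rfl h0
  have h2 : CellEqZM M.length M.headI.length (fun r => (M.getD r []).length)
      (fun r c => ((M.getD r []).map some).getD c none)
      ((List.range M.length).foldl (fun s i =>
        (List.range M.headI.length).foldl (fun s j => pvMark s i j) s)
        (M.map (fun r => r.map some)))
      (pvF M M.length M.headI.length (pvVis 0 0)) := by
    refine cellEqZM_congr h1 ?_
    intro r hr c hc
    have hanyr : ((List.range M.headI.length).any fun c' =>
        pvVis 0 0 r c' && decide (pvG M r c' = 0)) = false := by simp [pvVis]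
    have hanyc : ((List.range M.length).any fun r' =>
        pvVis 0 0 r' c && decide (pvG M r' c = 0)) = false := by simp [pvVis]
    by_cases hg : pvG M r c = 0
    · simp [pvF, pvVis, hg, hr]
    · simp [pvF, pvVis, hg, hr, hanyr, hanyc]
  have h3 := procAll_cellEqZM (M := M) hL M.length le_rfl h2
  -- the per-cell value of A's final state (first n columns)
  have hfinal : ∀ r, r < M.length → ∀ c, c < M.headI.length →
      pvF M M.length M.headI.length (pvVis M.length 0) r c =
      some (if (∃ c', c' < M.headI.length ∧ pvG M r c' = 0) ∨
              (∃ r', r' < M.length ∧ pvG M r' c = 0) then 0 else pvG M r c) := by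
    intro r hr c hc
    have hV : ∀ r', r' < M.length → ∀ c', pvVis M.length 0 r' c' = true := by
      intro r' h c'; simp [pvVis, h]
    by_cases hD : (∃ c', c' < M.headI.length ∧ pvG M r c' = 0) ∨
        (∃ r', r' < M.length ∧ pvG M r' c = 0)
    · rw [if_pos hD, pvF, if_neg (by rintro ⟨_, hv⟩; exact hv (hV r hr c)), if_pos ?_]
      rcases hD with ⟨c', hc', hg⟩ | ⟨r', hr', hg⟩
      · refine Or.inr (Or.inl ?_)
        simp only [List.any_eq_true, List.mem_range]
        exact ⟨c', hc', by simp [hV r hr c', hg]⟩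
      · refine Or.inr (Or.inr ?_)
        simp only [List.any_eq_true, List.mem_range]
        exact ⟨r', hr', by simp [hV r' hr' c, hg]⟩
    · rw [if_neg hD, pvF, if_neg (by rintro ⟨_, hv⟩; exact hv (hV r hr c)), if_neg ?_]
      rintro (hg | hany | hany)
      · exact hD (Or.inl ⟨c, hc, hg⟩)
      · obtain ⟨x, hx, hb⟩ := List.any_eq_true.mp hany
        simp only [Bool.and_eq_true, decide_eq_true_eq] at hb
        exact hD (Or.inl ⟨x, List.mem_range.mp hx, hb.2⟩)
      · obtain ⟨x, hx, hb⟩ := List.any_eq_true.mp hany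
        simp only [Bool.and_eq_true, decide_eq_true_eq] at hb
        exact hD (Or.inr ⟨x, List.mem_range.mp hx, hb.2⟩)
  -- B's row/column sets
  set rc := (List.range M.length).foldl (fun p i =>
      (List.range M.headI.length).foldl (fun p j =>
        if (M.getD i []).getD j 0 = 0 then
          (PySem.Set.add p.1 (i : Int), PySem.Set.add p.2 (j : Int))
        else p) p)
    ((PySem.Set.empty : PySem.Set Int), (PySem.Set.empty : PySem.Set Int)) with hrc
  have hmem := buildAll_mem M M.headI.length M.length
    ((PySem.Set.empty : PySem.Set Int), (PySem.Set.empty : PySem.Set Int))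
  have hcond : ∀ r, r < M.length → ∀ c, c < M.headI.length →
      ((PySem.Set.contains rc.1 (r : Int) || PySem.Set.contains rc.2 (c : Int)) = true ↔
        ((∃ c', c' < M.headI.length ∧ pvG M r c' = 0) ∨
          (∃ r', r' < M.length ∧ pvG M r' c = 0))) := by
    intro r hr c hc
    rw [Bool.or_eq_true, PySem.Set.contains_iff, PySem.Set.contains_iff, hrc]
    rw [(hmem (r : Int)).1, (hmem (c : Int)).2]
    constructor
    · rintro ((h | ⟨i, hi, hx, j, hj, hg⟩) | (h | ⟨j, hj, hx, i, hi, hg⟩))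
      · simp [PySem.Set.empty] at h
      · have : r = i := by exact_mod_cast hx
        subst this
        exact Or.inl ⟨j, hj, hg⟩
      · simp [PySem.Set.empty] at h
      · have : c = j := by exact_mod_cast hx
        subst this
        exact Or.inr ⟨i, hi, hg⟩
    · rintro (⟨c', hc', hg⟩ | ⟨r', hr', hg⟩)
      · exact Or.inl (Or.inr ⟨r, hr, rfl, c', hc', hg⟩)
      · exact Or.inr (Or.inr ⟨c, hc, rfl, r', hr', hg⟩)
  -- B's final state via the write-loop invariant
  have hB0 : CellW M.length M.headI.length (fun r => (M.getD r []).length)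
      (fun r c => pvG M r c) M (fun r c => pvG M r c) :=
    ⟨rfl, fun r _ => rfl, fun r _ c _ => rfl, fun r _ c _ => rfl⟩
  have hB := writeAll_cellW
    (cond := fun i j => PySem.Set.contains rc.1 (i : Int) || PySem.Set.contains rc.2 (j : Int))
    hL M.length le_rfl hB0
  -- extensional elementwise comparison of the two results
  show ((List.range M.length).foldl (fun s i =>
      (List.range M.headI.length).foldl (fun s j => pvProcess M.length M.headI.length s i j) s)
      ((List.range M.length).foldl (fun s i =>
        (List.range M.headI.length).foldl (fun s j => pvMark s i j) s)
        (M.map (fun r => r.map some)))).map (fun r => r.map (fun c => c.getD 0)) =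
    (List.range M.length).foldl (fun s (i : Nat) =>
      (List.range M.headI.length).foldl (fun s (j : Nat) =>
        if PySem.Set.contains rc.1 (i : Int) || PySem.Set.contains rc.2 (j : Int) then
          pvZero s i j
        else s) s) M
  set sA := (List.range M.length).foldl (fun s i =>
      (List.range M.headI.length).foldl (fun s j => pvProcess M.length M.headI.length s i j) s)
      ((List.range M.length).foldl (fun s i =>
        (List.range M.headI.length).foldl (fun s j => pvMark s i j) s)
        (M.map (fun r => r.map some))) with hsA
  set sB := (List.range M.length).foldl (fun s (i : Nat) =>
      (List.range M.headI.length).foldl (fun s (j : Nat) =>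
        if PySem.Set.contains rc.1 (i : Int) || PySem.Set.contains rc.2 (j : Int) then
          pvZero s i j
        else s) s) M with hsB
  apply List.ext_getElem
  · rw [List.length_map, h3.1, hB.1]
  · intro r hA hBl
    have hrm : r < M.length := by rw [hB.1] at hBl; exact hBl
    have hrs : r < sA.length := by rw [h3.1]; exact hrm
    have hrowD : M.getD r [] = M[r] := by
      rw [List.getD_eq_getElem?_getD, List.getElem?_eq_getElem hrm]; rfl
    have hrowlenA : (sA[r]'hrs).length = M[r].length := by
      have hthis := h3.2.1 r hrm
      simp only [List.getD_eq_getElem?_getD, List.getElem?_eq_getElem hrs,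
        List.getElem?_eq_getElem hrm, Option.getD_some] at hthis
      exact hthis
    have hrowlenB : (sB[r]'hBl).length = M[r].length := by
      have hthis := hB.2.1 r hrm
      simp only [List.getD_eq_getElem?_getD, List.getElem?_eq_getElem hBl,
        List.getElem?_eq_getElem hrm, Option.getD_some] at hthis
      exact hthis
    rw [List.getElem_map]
    apply List.ext_getElem
    · rw [List.length_map, hrowlenA, hrowlenB]
    · intro c hcA hcB
      have hcM : c < M[r].length := by rw [← hrowlenB]; exact hcB
      have hcsA : c < (sA[r]'hrs).length := by rw [hrowlenA]; exact hcM
      rw [List.getElem_map]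
      rw [← pvCell_getElem hrs hcsA, ← pvG_getElem hBl hcB]
      by_cases hcn : c < M.headI.length
      · rw [h3.2.2.1 r hrm c hcn, hfinal r hrm c hcn, hB.2.2.1 r hrm c hcn]
        beta_reduce
        by_cases hD : (∃ c', c' < M.headI.length ∧ pvG M r c' = 0) ∨
            (∃ r', r' < M.length ∧ pvG M r' c = 0)
        · rw [if_pos hD, if_pos ⟨hrm, (hcond r hrm c hcn).mpr hD⟩]
          rfl
        · rw [if_neg hD, if_neg (by rintro ⟨_, hb⟩; exact hD ((hcond r hrm c hcn).mp hb))]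
          rfl
      · push_neg at hcn
        rw [h3.2.2.2 r hrm c hcn, hB.2.2.2 r hrm c hcn]
        beta_reduce
        rw [hrowD]
        have hval : ((M[r].map some).getD c none) = some M[r][c] := by
          simp [List.getD_eq_getElem?_getD, List.getElem?_map,
            List.getElem?_eq_getElem hcM]
        rw [hval]
        exact (pvG_getElem hrm hcM).symm

-- ===== VERDICT (by name: the statement is the Claim_ definition above) =====
theorem zeroMatrixInplace_spec : Claim_equal_zeroMatrixInplace := by
  intro M _ hpre
  unfold Spec_zeroMatrixInplace
  exact AB_main M hpre.1 hpre.2
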